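-- pv_equiv track=rewrite | github.com/agfianf/annotate-anu | apps/api-core/src/app/core/password.py | _contains_substitutions
-- ===== SOURCE A (Python) =====
-- COMMON_SUBSTITUTIONS = {
--     "a": "4",
--     "e": "3",
--     "i": "1",
--     "o": "0",
--     "s": "5",
--     "t": "7",
--     "l": "1",
--     "b": "8",
--     "g": "9",
-- }
--
-- def _contains_substitutions(username: str, password: str) -> bool:
--     """Check if password contains username with common substitutions."""
--     modified_username = username.lower()
--     modified_password = password.lower()
--
--     for char, num in COMMON_SUBSTITUTIONS.items():
--         modified_username = modified_username.replace(char, num)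
--         modified_password = modified_password.replace(char, num)
--
--     return (modified_username in modified_password) or (
--         modified_password in modified_username
--     )
-- ===== SOURCE B (Python) =====
-- COMMON_SUBSTITUTIONS = {
--     "a": "4",
--     "e": "3",
--     "i": "1",
--     "o": "0",
--     "s": "5",
--     "t": "7",
--     "l": "1",
--     "b": "8",
--     "g": "9",
-- }
--
-- def _normalize(s: str) -> str:
--     # one pass: lowercase each character and map it through the table
--     return "".join(COMMON_SUBSTITUTIONS.get(c, c) for c in s.lower())
--
-- def _contains_substitutions(username: str, password: str) -> bool:
--     nu = _normalize(username)
--     np = _normalize(password)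
--     return (nu in np) or (np in nu)
-- ===== Notes on version B (the rewrite author's own statement) =====
-- stated objective: simpler
-- what changed: B replaces A's nine sequential full-string .replace passes (one scan of each string per substitution) with a single character-level pass that lowercases and maps each character through the substitution dict via .get(c, c); safe because no substitution target is itself a key, so A's replaces never chain.
import Mathlib
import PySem

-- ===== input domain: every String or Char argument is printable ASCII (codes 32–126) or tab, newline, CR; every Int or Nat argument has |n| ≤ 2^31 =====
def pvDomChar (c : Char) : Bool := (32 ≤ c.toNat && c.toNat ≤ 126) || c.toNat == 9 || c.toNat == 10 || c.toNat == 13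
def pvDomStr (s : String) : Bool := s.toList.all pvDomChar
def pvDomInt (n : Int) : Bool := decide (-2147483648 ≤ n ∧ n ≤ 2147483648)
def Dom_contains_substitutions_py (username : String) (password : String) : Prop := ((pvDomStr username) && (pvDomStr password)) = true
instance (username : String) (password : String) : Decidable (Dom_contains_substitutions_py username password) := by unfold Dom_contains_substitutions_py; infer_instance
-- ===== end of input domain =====

-- B replaces A's nine sequential full-string .replace passes by one single-pass
-- character-level normalizer using a lookup table (simpler; same result).

-- ===== PORT A =====
-- COMMON_SUBSTITUTIONS, the module-level dict
def pvSubsDict : PySem.Dict String String :=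
  PySem.Dict.ofList [("a","4"),("e","3"),("i","1"),("o","0"),("s","5"),("t","7"),("l","1"),("b","8"),("g","9")]

def contains_substitutions_py (username : String) (password : String) : Bool :=
  let modified_username := PySem.Str.lower username
  let modified_password := PySem.Str.lower password
  -- for char, num in COMMON_SUBSTITUTIONS.items(): replace in both strings
  let st := pvSubsDict.items.foldl
    (fun (st : String × String) kv =>
      (PySem.Str.replace st.1 kv.1 kv.2, PySem.Str.replace st.2 kv.1 kv.2))
    (modified_username, modified_password)
  PySem.Str.isIn st.1 st.2 || PySem.Str.isIn st.2 st.1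

-- ===== PORT B =====
-- the same table keyed by single characters (B reads it with .get(c, c))
def pvSubsTable : PySem.Dict Char Char :=
  PySem.Dict.ofList [('a','4'),('e','3'),('i','1'),('o','0'),('s','5'),('t','7'),('l','1'),('b','8'),('g','9')]

-- ''.join(COMMON_SUBSTITUTIONS.get(c, c) for c in s.lower())
def pvNormalize (s : String) : String :=
  String.ofList ((PySem.Chars.lower s.toList).map (fun c => pvSubsTable.getD c c))

def contains_substitutions_py_alt (username : String) (password : String) : Bool :=
  let nu := pvNormalize username
  let np := pvNormalize password
  PySem.Str.isIn nu np || PySem.Str.isIn np nu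

-- ===== PRECONDITION & SPEC =====
def Spec_contains_substitutions_py (username : String) (password : String) (out : Bool) : Prop := out = contains_substitutions_py_alt username password
instance (username : String) (password : String) (out : Bool) : Decidable (Spec_contains_substitutions_py username password out) := by unfold Spec_contains_substitutions_py; infer_instance

-- ===== CLAIM (what is proved, stated in full; the proofs are below) =====
def Claim_equal_contains_substitutions_py : Prop := ∀ (username : String) (password : String), Dom_contains_substitutions_py username password → Spec_contains_substitutions_py username password (contains_substitutions_py username password)

-- ===== LEMMAS AND PROOFS =====

-- replace.go with a single-char pattern consumes one character per step
theorem pv_replace_go_single (a b : Char) :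
    ∀ (l : List Char) (fuel : Nat) (acc : List Char), l.length ≤ fuel →
      PySem.Chars.replace.go [a] [b] fuel l acc
        = acc.reverse ++ l.map (fun c => if c = a then b else c) := by
  intro l
  induction l with
  | nil =>
      intro fuel acc _
      cases fuel <;> simp [PySem.Chars.replace.go]
  | cons c t ih =>
      intro fuel acc h
      cases fuel with
      | zero => simp at h
      | succ f =>
        by_cases hc : c = a
        · subst hc
          simp only [PySem.Chars.replace.go, List.isPrefixOf, BEq.rfl, Bool.true_and,
            if_true, List.length_cons, List.length_nil,
            List.drop_succ_cons, List.drop_zero, List.map_cons]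
          rw [ih f _ (by simpa using h)]
          simp
        · have hpre : [a].isPrefixOf (c :: t) = false := by
            simp [List.isPrefixOf]
            exact fun h' => (hc h'.symm).elim
          simp only [PySem.Chars.replace.go, hpre, if_neg, Bool.false_eq_true,
            not_false_iff, List.map_cons, if_neg hc]
          rw [ih f _ (by simpa using h)]
          simp

-- replacing a single character by a single character is a map
theorem pv_replace_single (s : List Char) (a b : Char) :
    PySem.Chars.replace s [a] [b] = s.map (fun c => if c = a then b else c) := by
  unfold PySem.Chars.replace
  simp only [List.isEmpty_cons, if_neg, Bool.false_eq_true, not_false_iff]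
  rw [pv_replace_go_single a b s s.length [] le_rfl]
  simp

-- one single-character substitution step, as a named function (proof-side helper)
def pvSub (a b x : Char) : Char := if x = a then b else x

-- the nine composed per-character substitutions equal the table lookup
theorem pv_comp_eq_table (c : Char) :
    pvSub 'g' '9' (pvSub 'b' '8' (pvSub 'l' '1' (pvSub 't' '7' (pvSub 's' '5'
      (pvSub 'o' '0' (pvSub 'i' '1' (pvSub 'e' '3' (pvSub 'a' '4' c)))))))) =
    pvSubsTable.getD c c := by
  by_cases h1 : c = 'a'; · subst h1; decide
  by_cases h2 : c = 'e'; · subst h2; decide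
  by_cases h3 : c = 'i'; · subst h3; decide
  by_cases h4 : c = 'o'; · subst h4; decide
  by_cases h5 : c = 's'; · subst h5; decide
  by_cases h6 : c = 't'; · subst h6; decide
  by_cases h7 : c = 'l'; · subst h7; decide
  by_cases h8 : c = 'b'; · subst h8; decide
  by_cases h9 : c = 'g'; · subst h9; decide
  have hkeys : pvSubsTable.keys = ['a','e','i','o','s','t','l','b','g'] := by decide
  have hc : pvSubsTable.contains c = false := by
    rw [PySem.Dict.contains_eq_decide_mem_keys, hkeys]
    simp [h1, h2, h3, h4, h5, h6, h7, h8, h9]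
  have htab : pvSubsTable.getD c c = c := PySem.Dict.getD_of_not_contains _ _ hc
  simp [pvSub, h1, h2, h3, h4, h5, h6, h7, h8, h9, htab]

-- A's nine replace passes normalize a lowered string exactly as B's one pass does
theorem pv_chain_eq_normalize (s : String) :
    (pvSubsDict.items.foldl (fun (t : String) kv => PySem.Str.replace t kv.1 kv.2)
      (PySem.Str.lower s)) = pvNormalize s := by
  have hitems : pvSubsDict.items =
      [("a","4"),("e","3"),("i","1"),("o","0"),("s","5"),("t","7"),("l","1"),("b","8"),("g","9")] := by
    decide
  rw [hitems]
  apply String.toList_inj.mp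
  simp only [List.foldl_cons, List.foldl_nil]
  simp only [PySem.Str.toList_replace, PySem.Str.toList_lower, pvNormalize]
  simp only [show ("a":String).toList = ['a'] from rfl, show ("4":String).toList = ['4'] from rfl,
    show ("e":String).toList = ['e'] from rfl, show ("3":String).toList = ['3'] from rfl,
    show ("i":String).toList = ['i'] from rfl, show ("1":String).toList = ['1'] from rfl,
    show ("o":String).toList = ['o'] from rfl, show ("0":String).toList = ['0'] from rfl,
    show ("s":String).toList = ['s'] from rfl, show ("5":String).toList = ['5'] from rfl,
    show ("t":String).toList = ['t'] from rfl, show ("7":String).toList = ['7'] from rfl,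
    show ("l":String).toList = ['l'] from rfl, show ("b":String).toList = ['b'] from rfl,
    show ("8":String).toList = ['8'] from rfl, show ("g":String).toList = ['g'] from rfl,
    show ("9":String).toList = ['9'] from rfl]
  rw [pv_replace_single, pv_replace_single, pv_replace_single, pv_replace_single,
    pv_replace_single, pv_replace_single, pv_replace_single, pv_replace_single, pv_replace_single]
  simp only [show (fun c => if c = 'a' then '4' else c) = pvSub 'a' '4' from rfl,
    show (fun c => if c = 'e' then '3' else c) = pvSub 'e' '3' from rfl,
    show (fun c => if c = 'i' then '1' else c) = pvSub 'i' '1' from rfl,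
    show (fun c => if c = 'o' then '0' else c) = pvSub 'o' '0' from rfl,
    show (fun c => if c = 's' then '5' else c) = pvSub 's' '5' from rfl,
    show (fun c => if c = 't' then '7' else c) = pvSub 't' '7' from rfl,
    show (fun c => if c = 'l' then '1' else c) = pvSub 'l' '1' from rfl,
    show (fun c => if c = 'b' then '8' else c) = pvSub 'b' '8' from rfl,
    show (fun c => if c = 'g' then '9' else c) = pvSub 'g' '9' from rfl]
  simp only [List.map_map, String.toList_ofList, Function.comp_def]
  apply List.map_congr_left
  intro c _
  exact pv_comp_eq_table c

-- the paired fold over both strings is the fold on each component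
theorem pv_fold_pair (l : List (String × String)) (u p : String) :
    l.foldl (fun (st : String × String) kv =>
        (PySem.Str.replace st.1 kv.1 kv.2, PySem.Str.replace st.2 kv.1 kv.2)) (u, p)
      = (l.foldl (fun t kv => PySem.Str.replace t kv.1 kv.2) u,
         l.foldl (fun t kv => PySem.Str.replace t kv.1 kv.2) p) := by
  induction l generalizing u p with
  | nil => rfl
  | cons kv t ih => simp [List.foldl_cons, ih]

-- ===== VERDICT (by name: the statement is the Claim_ definition above) =====
theorem contains_substitutions_py_spec : Claim_equal_contains_substitutions_py := by
  intro username password _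
  unfold Spec_contains_substitutions_py contains_substitutions_py contains_substitutions_py_alt
  simp only [pv_fold_pair, pv_chain_eq_normalize]
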